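-- pv_equiv track=rewrite | github.com/ma-gabriel/advent-of-code | 2024/11/bonus.py | update
-- ===== SOURCE A (Python) =====
-- def update(stones):
--     res = list()
--     for stone, poids in stones:
--         strStone = str(stone)
--         lenStone = len(strStone)
--         if stone == 0:
--             res.append([1, poids])
--         elif not lenStone % 2:
--             res.append([int(strStone[:lenStone // 2]), poids])
--             res.append([int(strStone[lenStone // 2:]), poids])
--         else:
--             res.append([stone * 2024, poids])
--     dictio = dict()
--     for stone, poids in res:
--         if stone not in dictio:
--             dictio[stone] = poids
--         else:
--             dictio[stone] += poids
--     return list(dictio.items())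
-- ===== SOURCE B (Python) =====
-- def update(stones):
--     def kids(stone):
--         if stone == 0:
--             return [1]
--         s = str(stone)
--         n = len(s)
--         if n % 2 == 0:
--             return [int(s[:n // 2]), int(s[n // 2:])]
--         return [stone * 2024]
--
--     pairs = [(k, poids) for stone, poids in stones for k in kids(stone)]
--     keys = []
--     for k, _ in pairs:
--         if k not in keys:
--             keys.append(k)
--     return [(k, sum(w for k2, w in pairs if k2 == k)) for k in keys]
-- ===== Notes on version B (the rewrite author's own statement) =====
-- stated objective: alternative
-- what changed: A aggregates by mutating a dict entry-by-entry in a second loop; B uses no dict at all: it builds the flat (value, weight) pairs by comprehension, collects the distinct values in first-appearance order into a plain list, and computes each output weight as a sum over the pairs (a group-by-scan instead of hash aggregation).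
import Mathlib
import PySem

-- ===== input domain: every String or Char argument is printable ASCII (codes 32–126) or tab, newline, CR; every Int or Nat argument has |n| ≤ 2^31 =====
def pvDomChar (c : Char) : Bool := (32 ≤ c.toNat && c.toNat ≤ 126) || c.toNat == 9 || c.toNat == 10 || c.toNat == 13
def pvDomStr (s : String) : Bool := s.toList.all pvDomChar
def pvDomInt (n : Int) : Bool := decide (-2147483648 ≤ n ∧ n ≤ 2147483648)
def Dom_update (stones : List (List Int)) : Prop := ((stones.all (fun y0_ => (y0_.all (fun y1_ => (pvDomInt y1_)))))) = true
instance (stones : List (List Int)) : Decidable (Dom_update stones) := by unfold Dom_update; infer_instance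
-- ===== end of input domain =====

-- B replaces A's entry-by-entry dict aggregation by a dict-free group-by: flat pairs,
-- distinct values in first-appearance order, one sum per value (objective: alternative).


-- ===== PORT A =====
-- body of A's first loop: the per-stone appends to res (strings handled as List Char via
-- PySem.Int.toChars, int(...) via PySem.Int.ofChars?, exact; the .getD 0 is never reached under Pre_)
def pvStepA (res : List (Int × Int)) (p : List Int) : List (Int × Int) :=
  let stone := PySem.List.pyGetD p 0 0
  let poids := PySem.List.pyGetD p 1 0
  let strStone := PySem.Int.toChars stone
  let lenStone := strStone.length
  if stone = 0 then
    res ++ [(1, poids)]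
  else if lenStone % 2 = 0 then
    res ++ [((PySem.Int.ofChars? (PySem.List.slice strStone none (some ((lenStone / 2 : Nat) : Int)))).getD 0, poids),
            ((PySem.Int.ofChars? (PySem.List.slice strStone (some ((lenStone / 2 : Nat) : Int)) none)).getD 0, poids)]
  else
    res ++ [(stone * 2024, poids)]

-- body of A's second loop: 'if stone not in dictio: dictio[stone] = poids else: dictio[stone] += poids'
def pvAggA (d : PySem.Dict Int Int) (sp : Int × Int) : PySem.Dict Int Int :=
  if d.contains sp.1 = false then d.insert sp.1 sp.2
  else d.insert sp.1 (d.getD sp.1 0 + sp.2)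

def update (stones : List (List Int)) : List (Int × Int) :=
  -- res = stones.foldl pvStepA []; dictio = res.foldl pvAggA {}; return dictio.items
  (((stones.foldl pvStepA []).foldl pvAggA PySem.Dict.empty : PySem.Dict Int Int)).items

-- ===== PORT B =====
-- Source B's helper kids(stone): the values one stone produces
def pvKids (stone : Int) : List Int :=
  let s := PySem.Int.toChars stone
  let n := s.length
  if stone = 0 then [1]
  else if n % 2 = 0 then
    [((PySem.Int.ofChars? (PySem.List.slice s none (some ((n / 2 : Nat) : Int)))).getD 0),
     ((PySem.Int.ofChars? (PySem.List.slice s (some ((n / 2 : Nat) : Int)) none)).getD 0)]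
  else [stone * 2024]

def update_alt (stones : List (List Int)) : List (Int × Int) :=
  -- pairs = [(k, poids) for stone, poids in stones for k in kids(stone)]
  let pairs := stones.flatMap (fun p =>
    (pvKids (PySem.List.pyGetD p 0 0)).map (fun k => (k, PySem.List.pyGetD p 1 0)))
  -- keys = []; for k, _ in pairs: if k not in keys: keys.append(k)   (append-if-absent = PySem.Set.add)
  let keys := pairs.foldl (fun ks q => PySem.Set.add ks q.1) ([] : PySem.Set Int)
  -- return [(k, sum(w for k2, w in pairs if k2 == k)) for k in keys]
  keys.map (fun k => (k, ((pairs.filter (fun q => q.1 == k)).map (·.2)).sum))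

-- ===== PRECONDITION & SPEC =====
-- Pre_ excludes exactly where the Python A raises: an inner list that is not a pair
-- (ValueError on unpacking) and stones in -9..-1 (str(stone) has even length 2, so
-- int("-") raises ValueError on the left half).
def Pre_update (stones : List (List Int)) : Prop :=
  ∀ p ∈ stones, p.length = 2 ∧ ¬ (-9 ≤ p.getD 0 0 ∧ p.getD 0 0 ≤ -1)
instance (stones : List (List Int)) : Decidable (Pre_update stones) := by unfold Pre_update; infer_instance
def pvWitness_update : List (List Int) := [[0, 3], [2024, 2], [17, 1]]

def Spec_update (stones : List (List Int)) (out : List (Int × Int)) : Prop := out = update_alt stones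
instance (stones : List (List Int)) (out : List (Int × Int)) : Decidable (Spec_update stones out) := by unfold Spec_update; infer_instance

-- ===== CLAIM (what is proved, stated in full; the proofs are below) =====
def Claim_equal_update : Prop := ∀ (stones : List (List Int)), Dom_update stones → Pre_update stones → Spec_update stones (update stones)

-- ===== LEMMAS AND PROOFS =====

-- A's per-stone appended list is B's kids, each paired with poids
theorem pv_stepA_eq_append (res : List (Int × Int)) (p : List Int) :
    pvStepA res p
      = res ++ (pvKids (PySem.List.pyGetD p 0 0)).map (fun k => (k, PySem.List.pyGetD p 1 0)) := by
  simp only [pvStepA, pvKids]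
  split_ifs <;> simp

-- A's aggregation step equals "insert k (getD k 0 + v)" in both branches
theorem pv_aggA_eq (d : PySem.Dict Int Int) (sp : Int × Int) :
    pvAggA d sp = d.insert sp.1 (d.getD sp.1 0 + sp.2) := by
  unfold pvAggA
  by_cases h : d.contains sp.1 = false
  · rw [if_pos h]
    simp [PySem.Dict.getD_of_not_contains, h]
  · rw [if_neg h]

-- after A's aggregation loop, a key's entry is its weight-sum over the processed pairs
theorem pv_getD_foldl_sum (ps : List (Int × Int)) (d : PySem.Dict Int Int) (k : Int) :
    (ps.foldl (fun d q => d.insert q.1 (d.getD q.1 0 + q.2)) d).getD k 0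
      = d.getD k 0 + ((ps.filter (fun q => q.1 == k)).map (·.2)).sum := by
  induction ps generalizing d with
  | nil => simp
  | cons q ps ih =>
    simp only [List.foldl_cons, List.filter_cons, ih]
    by_cases h : q.1 = k
    · simp [h, PySem.Dict.getD_insert]
      ring
    · simp [h, PySem.Dict.getD_insert, Ne.symm h]

-- ===== VERDICT (by name: the statement is the Claim_ definition above) =====
theorem update_spec : Claim_equal_update := by
  intro stones _ _
  show update stones = update_alt stones
  unfold update update_alt
  have hstep : pvStepA = fun res p =>
      res ++ (pvKids (PySem.List.pyGetD p 0 0)).map (fun k => (k, PySem.List.pyGetD p 1 0)) :=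
    funext fun res => funext fun p => pv_stepA_eq_append res p
  have hagg : pvAggA = fun (d : PySem.Dict Int Int) q => d.insert q.1 (d.getD q.1 0 + q.2) :=
    funext fun d => funext fun q => pv_aggA_eq d q
  rw [hstep, PySem.List.foldl_append_eq_flatMap, List.nil_append, hagg]
  set pairs := stones.flatMap (fun p =>
    (pvKids (PySem.List.pyGetD p 0 0)).map (fun k => (k, PySem.List.pyGetD p 1 0))) with hpairs
  have hnd : (pairs.foldl (fun (d : PySem.Dict Int Int) q => d.insert q.1 (d.getD q.1 0 + q.2))
      PySem.Dict.empty).keys.Nodup :=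
    PySem.Dict.nodup_keys_foldl_insert_key pairs (·.1) _ _ PySem.Dict.nodup_keys_empty
  rw [PySem.Dict.items_eq_map_keys _ hnd 0]
  have hkeys : (pairs.foldl (fun (d : PySem.Dict Int Int) q => d.insert q.1 (d.getD q.1 0 + q.2))
      PySem.Dict.empty).keys = pairs.foldl (fun ks q => PySem.Set.add ks q.1) [] := by
    rw [PySem.Dict.keys_foldl_insert_key pairs (·.1)]
    simp only [PySem.Dict.keys_empty]
    rw [← PySem.Set.update_map_eq_foldl_add]
  rw [hkeys]
  refine List.map_congr_left fun k _ => ?_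
  rw [pv_getD_foldl_sum]
  simp
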